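-- pv_equiv track=rewrite | github.com/WooooCash/EDProjekt | src/preprocessing.py | to_numeric
-- ===== SOURCE A (Python) =====
-- def to_numeric(column: list, config: dict) -> list[int]:
--     """
--     column: list of string values
--     config: empty
--     """
--     if type(column[0]) == int:
--         return column
--
--     modified_col = []
--     mapping: dict[str, int] = {}
--
--     for value in column:
--         numeric_val = mapping.get(value)
--         if numeric_val is None:
--             numeric_val = len(mapping)
--             mapping[value] = numeric_val
--
--         modified_col.append(numeric_val)
--
--     return modified_col
-- ===== SOURCE B (Python) =====
-- def to_numeric(column: list, config: dict) -> list: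
--     """
--     column: list of string values
--     config: empty
--     """
--     if type(column[0]) == int:
--         return column
--
--     # dcount[i] = number of distinct values in column[:i]
--     seen = set()
--     dcount = []
--     for v in column:
--         dcount.append(len(seen))
--         seen.add(v)
--     # each value's code = distinct count just before its first occurrence
--     return [dcount[column.index(v)] for v in column]
-- ===== Notes on version B (the rewrite author's own statement) =====
-- stated objective: alternative
-- what changed: Removes A's value-to-code mapping table: B first records the running distinct count per prefix with a plain set, then reads each element's code off at its first-occurrence index (dcount[column.index(v)]) in a separate pass; it trades A's O(n) dict algorithm for a table-free positional one that is quadratic in the worst case.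
-- outside the precondition, e.g. on to_numeric([], {}): A raises IndexError, B raises IndexError
import Mathlib
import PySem

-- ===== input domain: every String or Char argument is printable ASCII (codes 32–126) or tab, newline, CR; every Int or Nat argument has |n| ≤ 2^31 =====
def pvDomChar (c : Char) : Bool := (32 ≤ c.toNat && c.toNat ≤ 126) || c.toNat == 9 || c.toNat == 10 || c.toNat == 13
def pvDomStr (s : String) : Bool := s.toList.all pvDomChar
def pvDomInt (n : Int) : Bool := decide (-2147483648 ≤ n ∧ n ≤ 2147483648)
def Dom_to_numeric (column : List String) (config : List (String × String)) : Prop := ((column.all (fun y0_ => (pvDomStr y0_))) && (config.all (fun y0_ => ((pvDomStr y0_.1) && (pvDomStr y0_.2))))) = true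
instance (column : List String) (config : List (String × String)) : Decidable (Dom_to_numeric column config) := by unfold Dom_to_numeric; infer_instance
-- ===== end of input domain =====

-- B drops the value-to-code mapping table: a first pass records the running distinct count
-- per prefix, then each value's code is read off at its first-occurrence index; objective: alternative.


-- ===== PORT A =====
-- one loop iteration: look the value up; if absent, assign it the next code (len(mapping))
-- and insert it; append the code to modified_col.  State = (modified_col, mapping).
def to_numeric_step (st : List Int × PySem.Dict String Int) (value : String) :
    List Int × PySem.Dict String Int :=
  match st.2.get? value with            -- numeric_val = mapping.get(value)
  | some n => (st.1 ++ [n], st.2)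
  | none   => (st.1 ++ [(st.2.size : Int)], st.2.insert value (st.2.size : Int))

-- the guard `type(column[0]) == int` is identically False for a string column (and `column[0]`
-- raises IndexError on [], excluded by Pre_), so only the loop remains.
def to_numeric (column : List String) (config : List (String × String)) : List Int :=
  (column.foldl to_numeric_step ([], PySem.Dict.empty)).1

-- ===== PORT B =====
-- same identically-false guard dropped; pass 1: 'dcount.append(len(seen)); seen.add(v)' →
-- fold over (dcount, seen) with PySem.Set; pass 2: dcount[column.index(v)] — column.index →
-- PySem.List.index? (ValueError = none is unreachable, v is drawn from column; ported as a
-- match with default 0) and the in-range list indexing dcount[j] → PySem.List.pyGetD.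
def to_numeric_alt (column : List String) (config : List (String × String)) : List Int :=
  let dcount := (column.foldl
      (fun (st : List Int × PySem.Set String) v =>
        (st.1 ++ [(PySem.Set.len st.2 : Int)], PySem.Set.add st.2 v))
      ([], PySem.Set.empty)).1
  column.map (fun v =>
    match PySem.List.index? column v with
    | some j => PySem.List.pyGetD dcount (j : Int) 0
    | none   => 0)

-- ===== PRECONDITION & SPEC =====
-- Pre_ excludes only the empty column, on which both Pythons raise IndexError at column[0].
def Pre_to_numeric (column : List String) (config : List (String × String)) : Prop :=
  column ≠ []
instance (column : List String) (config : List (String × String)) : Decidable (Pre_to_numeric column config) := by unfold Pre_to_numeric; infer_instance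

def pvWitness_to_numeric : List String × (List (String × String)) := (["a", "b", "a"], [])

def Spec_to_numeric (column : List String) (config : List (String × String)) (out : List Int) : Prop := out = to_numeric_alt column config
instance (column : List String) (config : List (String × String)) (out : List Int) : Decidable (Spec_to_numeric column config out) := by unfold Spec_to_numeric; infer_instance

-- ===== CLAIM (what is proved, stated in full; the proofs are below) =====
def Claim_equal_to_numeric : Prop := ∀ (column : List String) (config : List (String × String)), Dom_to_numeric column config → Pre_to_numeric column config → Spec_to_numeric column config (to_numeric column config)

-- ===== LEMMAS AND PROOFS =====

theorem dict_size_eq_keys_length (d : PySem.Dict String Int) : d.size = d.keys.length := by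
  simp [PySem.Dict.size, PySem.Dict.keys]

-- A's loop invariant: if the accumulated dict maps each of its keys to its position in the
-- (Nodup) key list, the loop emits, for each remaining value, its index in the keys extended
-- by the first occurrences of the remaining values.
theorem to_numeric_loop
    (rest : List String) (d : PySem.Dict String Int) (acc : List Int)
    (hnd : d.keys.Nodup)
    (hP : ∀ v i, d.get? v = some i → i = (List.idxOf v d.keys : Int)) :
    (rest.foldl to_numeric_step (acc, d)).1
      = acc ++ rest.map (fun v => (List.idxOf v (PySem.Set.update d.keys rest) : Int)) := by
  induction rest generalizing d acc with
  | nil => simp [PySem.Set.update]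
  | cons v rest ih =>
    rw [List.foldl_cons]
    rcases hget : d.get? v with _ | n
    · -- new key
      have hc : d.contains v = false := (PySem.Dict.get?_eq_none_iff_contains d v).mp hget
      have hvnot : v ∉ d.keys := fun hm =>
        by simp [(PySem.Dict.contains_iff_mem_keys d v).mpr hm] at hc
      have hkeys : (d.insert v (d.size : Int)).keys = d.keys ++ [v] :=
        PySem.Dict.keys_insert_of_not_contains d _ hc
      have hnd' : (d.insert v (d.size : Int)).keys.Nodup :=
        PySem.Dict.nodup_keys_insert d _ _ hnd
      have hP' : ∀ w i, (d.insert v (d.size : Int)).get? w = some i →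
          i = (List.idxOf w (d.insert v (d.size : Int)).keys : Int) := by
        intro w i hw
        rw [PySem.Dict.get?_insert] at hw
        rw [hkeys]
        split_ifs at hw with hwv
        · subst hwv
          have : List.idxOf w (d.keys ++ [w]) = d.keys.length := by
            rw [List.idxOf_append]
            simp [hvnot]
          rw [this]
          cases hw
          rw [dict_size_eq_keys_length]
        · have hwmem : w ∈ d.keys := by
            have : d.contains w = true := by
              rw [PySem.Dict.contains_eq_isSome_get?, hw]; rfl
            exact (PySem.Dict.contains_iff_mem_keys d w).mp this
          rw [List.idxOf_append, if_pos hwmem]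
          exact hP w i hw
      have hstep : to_numeric_step (acc, d) v
          = (acc ++ [(d.size : Int)], d.insert v (d.size : Int)) := by
        simp [to_numeric_step, hget]
      rw [hstep, ih _ _ hnd' hP']
      rw [List.map_cons, PySem.Set.update_cons, PySem.Set.add_of_not_mem hvnot, hkeys]
      have hhead : (List.idxOf v (PySem.Set.update (d.keys ++ [v]) rest) : Int)
          = (d.size : Int) := by
        rw [PySem.Set.update_eq_append_filter, List.idxOf_append, if_pos (by simp),
          List.idxOf_append]
        simp [hvnot, dict_size_eq_keys_length]
      rw [hhead]
      simp
    · -- existing key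
      have hvmem : v ∈ d.keys := by
        have : d.contains v = true := by
          rw [PySem.Dict.contains_eq_isSome_get?, hget]; rfl
        exact (PySem.Dict.contains_iff_mem_keys d v).mp this
      have hstep : to_numeric_step (acc, d) v = (acc ++ [n], d) := by
        simp [to_numeric_step, hget]
      rw [hstep, ih _ _ hnd hP]
      rw [List.map_cons, PySem.Set.update_cons, PySem.Set.add_of_mem hvmem]
      have hhead : (List.idxOf v (PySem.Set.update d.keys rest) : Int) = n := by
        rw [PySem.Set.update_eq_append_filter, List.idxOf_append, if_pos hvmem]
        exact (hP v n hget).symm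
      rw [hhead]
      simp

-- B's pass 1: dcount lists, for each position i, the number of distinct values in column[:i].
theorem alt_dcount (xs : List String) (s : PySem.Set String) (acc : List Int) :
    (xs.foldl
        (fun (st : List Int × PySem.Set String) v =>
          (st.1 ++ [(PySem.Set.len st.2 : Int)], PySem.Set.add st.2 v))
        (acc, s)).1
      = acc ++ (List.range xs.length).map
          (fun i => ((PySem.Set.update s (xs.take i)).length : Int)) := by
  induction xs generalizing s acc with
  | nil => simp
  | cons v xs ih =>
    rw [List.foldl_cons, ih]
    simp only [List.length_cons, List.range_succ_eq_map, List.map_cons, List.take_zero,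
      List.map_map]
    simp [PySem.Set.update_nil, PySem.Set.update_cons, PySem.Set.len, Function.comp]

-- B's pass 2 at v: the distinct count of the prefix before the first occurrence of v IS
-- v's position in the ordered-unique elements of the whole column.
theorem alt_prefix_count (column : List String) (v : String) (k : Nat)
    (hidx : PySem.List.index? column v = some k) :
    ((PySem.Set.ofList (column.take k)).length : Int)
      = (List.idxOf v (PySem.Set.ofList column) : Int) := by
  obtain ⟨pre, suf, hcol, hlen, hvpre⟩ := (PySem.List.index?_eq_some_iff column v k).mp hidx
  have htake : column.take k = pre := by rw [hcol, ← hlen, List.take_left]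
  have hvnotofl : v ∉ PySem.Set.ofList pre := by
    simpa [PySem.Set.mem_ofList] using hvpre
  have hofl : PySem.Set.ofList column
      = (PySem.Set.ofList pre ++ [v])
          ++ (PySem.Set.ofList suf).filter
              (fun y => !(PySem.Set.contains (PySem.Set.ofList pre ++ [v]) y)) := by
    rw [hcol, PySem.Set.ofList_append, PySem.Set.update_cons,
      PySem.Set.add_of_not_mem hvnotofl, PySem.Set.update_eq_append_filter]
  rw [htake, hofl, List.idxOf_append, if_pos (by simp), List.idxOf_append]
  simp [hvnotofl]

-- ===== VERDICT (by name: the statement is the Claim_ definition above) =====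
theorem to_numeric_spec : Claim_equal_to_numeric := by
  intro column config _ _
  unfold Spec_to_numeric to_numeric to_numeric_alt
  rw [to_numeric_loop column PySem.Dict.empty [] (by simp) (by simp [PySem.Dict.get?_empty])]
  rw [PySem.Dict.keys_empty, PySem.Set.update_nil_left, List.nil_append]
  rw [alt_dcount column PySem.Set.empty []]
  apply List.map_congr_left
  intro v hv
  rcases hidx : PySem.List.index? column v with _ | k
  · exact absurd ((PySem.List.index?_eq_none_iff column v).mp hidx) (by simpa using hv)
  · obtain ⟨pre, suf, hcol, hlen, hvpre⟩ := (PySem.List.index?_eq_some_iff column v k).mp hidx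
    have hk : k < column.length := by rw [hcol, ← hlen]; simp
    show (List.idxOf v (PySem.Set.ofList column) : Int)
        = PySem.List.pyGetD ([] ++ (List.range column.length).map
            (fun i => ((PySem.Set.update PySem.Set.empty (column.take i)).length : Int))) (k : Int) 0
    rw [List.nil_append, PySem.List.pyGetD_natCast, List.getD_eq_getElem?_getD,
      List.getElem?_map, List.getElem?_range hk]
    simp only [Option.map_some, Option.getD_some, PySem.Set.update_nil_left]
    exact (alt_prefix_count column v k hidx).symm
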